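-- pv_equiv track=rewrite | github.com/MRyderOC/HackerRank-Solutions | Mathematics/Combinatorics/A Chocolate Fiesta.py | solve
-- ===== SOURCE A (Python) =====
-- def solve(a):
--     odds, evens = 0, 0
--     for item in a:
--         if item % 2 == 0:
--             evens += 1
--         else:
--             odds += 1
--
--     if odds == 0:
--         solution = (2 ** evens) - 1
--     else:
--         solution = ((2 ** (odds - 1)) * (2 ** evens)) - 1
--
--     return solution % (10 ** 9 + 7)
-- ===== SOURCE B (Python) =====
-- def solve(a):
--     MOD = 10 ** 9 + 7
--     ways_even, ways_odd = 1, 0  # subset counts by sum parity; empty set counted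
--     for item in a:
--         if item % 2 == 0:
--             ways_even, ways_odd = (2 * ways_even) % MOD, (2 * ways_odd) % MOD
--         else:
--             s = (ways_even + ways_odd) % MOD
--             ways_even, ways_odd = s, s
--     return (ways_even - 1) % MOD
-- ===== Notes on version B (the rewrite author's own statement) =====
-- stated objective: alternative
-- what changed: replaces count-odds/evens-then-closed-form-power with a single-pass parity DP keeping (even-sum, odd-sum) subset counts reduced mod 1e9+7 at every step, so no big-integer powers are ever built
import Mathlib
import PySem

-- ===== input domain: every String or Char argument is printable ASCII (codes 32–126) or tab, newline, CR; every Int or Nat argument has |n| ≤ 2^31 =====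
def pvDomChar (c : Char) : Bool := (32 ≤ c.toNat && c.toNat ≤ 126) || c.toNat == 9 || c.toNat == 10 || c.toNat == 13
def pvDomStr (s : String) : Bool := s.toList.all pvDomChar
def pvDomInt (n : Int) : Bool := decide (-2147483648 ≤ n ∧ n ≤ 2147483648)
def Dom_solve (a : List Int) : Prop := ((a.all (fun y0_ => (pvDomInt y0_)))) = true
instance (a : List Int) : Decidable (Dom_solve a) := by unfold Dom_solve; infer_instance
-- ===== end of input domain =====

-- B replaces A's count-then-closed-form strategy by a one-pass parity DP
-- (subset counts by even/odd sum, reduced mod 10^9+7 at every step); alternative decomposition.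

-- ===== PORT A =====
def solveCount (s : Nat × Nat) (item : Int) : Nat × Nat :=
  if PySem.Int.mod item 2 == 0 then (s.1, s.2 + 1) else (s.1 + 1, s.2)

def solve (a : List Int) : Int :=
  let c := a.foldl solveCount (0, 0)
  let solution : Int :=
    if c.1 = 0 then (2 : Int) ^ c.2 - 1
    else (2 : Int) ^ (c.1 - 1) * (2 : Int) ^ c.2 - 1
  PySem.Int.mod solution (10 ^ 9 + 7)

-- ===== PORT B =====
def solveStep (s : Int × Int) (item : Int) : Int × Int :=
  if PySem.Int.mod item 2 == 0 then
    (PySem.Int.mod (2 * s.1) (10 ^ 9 + 7), PySem.Int.mod (2 * s.2) (10 ^ 9 + 7))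
  else
    (PySem.Int.mod (s.1 + s.2) (10 ^ 9 + 7), PySem.Int.mod (s.1 + s.2) (10 ^ 9 + 7))

def solve_alt (a : List Int) : Int :=
  let w := a.foldl solveStep (1, 0)
  PySem.Int.mod (w.1 - 1) (10 ^ 9 + 7)

-- ===== PRECONDITION & SPEC =====
def Spec_solve (a : List Int) (out : Int) : Prop := out = solve_alt a
instance (a : List Int) (out : Int) : Decidable (Spec_solve a out) := by unfold Spec_solve; infer_instance

-- ===== CLAIM (what is proved, stated in full; the proofs are below) =====
def Claim_equal_solve : Prop := ∀ (a : List Int), Dom_solve a → Spec_solve a (solve a)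

-- ===== LEMMAS AND PROOFS =====

def pvP : Int := 10 ^ 9 + 7
def pvOc (a : List Int) : Nat := a.countP (fun x => !(PySem.Int.mod x 2 == 0))
def pvEc (a : List Int) : Nat := a.countP (fun x => PySem.Int.mod x 2 == 0)

def pvPureE (a : List Int) (E O : Int) : Int :=
  if pvOc a = 0 then 2 ^ (pvEc a) * E else 2 ^ (a.length - 1) * (E + O)

lemma pvOc_cons (x : Int) (t : List Int) :
    pvOc (x :: t) = pvOc t + (if (PySem.Int.mod x 2 == 0) = true then 0 else 1) := by
  by_cases h : (PySem.Int.mod x 2 == 0) = true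
  · have hd : (2 : Int) ∣ x := (PySem.Int.mod_eq_zero_iff_dvd x 2).mp (by simpa using h)
    have h0 : x % 2 = 0 := Int.emod_eq_zero_of_dvd hd
    simp [pvOc, h0]
  · have hd : ¬ (2 : Int) ∣ x := fun d =>
      h (by rw [show PySem.Int.mod x 2 = 0 from (PySem.Int.mod_eq_zero_iff_dvd x 2).mpr d]; rfl)
    have h1 : x % 2 = 1 := by
      rcases Int.emod_two_eq x with h0 | h1
      · exact absurd (Int.dvd_of_emod_eq_zero h0) hd
      · exact h1
    simp [pvOc, h1]

lemma pvEc_cons (x : Int) (t : List Int) :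
    pvEc (x :: t) = pvEc t + (if (PySem.Int.mod x 2 == 0) = true then 1 else 0) := by
  simp only [pvEc, List.countP_cons]

lemma pvOc_add_pvEc (a : List Int) : pvOc a + pvEc a = a.length := by
  induction a with
  | nil => rfl
  | cons x t ih =>
    rw [pvOc_cons, pvEc_cons, List.length_cons]
    by_cases h : (PySem.Int.mod x 2 == 0) = true
    · rw [if_pos h, if_pos h]; omega
    · rw [if_neg h, if_neg h]; omega

lemma pvOc_le (a : List Int) : pvOc a ≤ a.length := List.countP_le_length

lemma pvModP_eq (x : Int) : PySem.Int.mod x (10 ^ 9 + 7) = x % pvP := by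
  rw [PySem.Int.mod_eq_emod_of_pos (by norm_num)]; rfl

lemma pvMul2 (x : Int) : (2 * (x % pvP)) % pvP = (2 * x) % pvP := by
  rw [Int.mul_emod, Int.emod_emod_of_dvd _ dvd_rfl, ← Int.mul_emod]

lemma pvAdd (x y : Int) : (x % pvP + y % pvP) % pvP = (x + y) % pvP := by
  rw [Int.add_emod, Int.emod_emod_of_dvd _ dvd_rfl, Int.emod_emod_of_dvd _ dvd_rfl,
    ← Int.add_emod]

lemma pvSub1 (x : Int) : (x % pvP - 1) % pvP = (x - 1) % pvP := by
  rw [Int.sub_emod, Int.emod_emod_of_dvd _ dvd_rfl, ← Int.sub_emod]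

lemma pvCountA (a : List Int) (o e : Nat) :
    a.foldl solveCount (o, e) = (o + pvOc a, e + pvEc a) := by
  induction a generalizing o e with
  | nil => simp [pvOc, pvEc]
  | cons x t ih =>
    rw [List.foldl_cons, pvOc_cons, pvEc_cons]
    by_cases h : (PySem.Int.mod x 2 == 0) = true
    · rw [if_pos h, if_pos h,
        show solveCount (o, e) x = (o, e + 1) from by unfold solveCount; rw [if_pos h], ih]
      simp only [Prod.mk.injEq]; omega
    · rw [if_neg h, if_neg h,
        show solveCount (o, e) x = (o + 1, e) from by unfold solveCount; rw [if_neg h], ih]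
      simp only [Prod.mk.injEq]; omega

lemma pvPureE_cons_even (x : Int) (t : List Int) (E O : Int)
    (h : (PySem.Int.mod x 2 == 0) = true) :
    pvPureE (x :: t) E O = pvPureE t (2 * E) (2 * O) := by
  simp only [pvPureE, pvOc_cons, pvEc_cons, List.length_cons]
  rw [if_pos h, if_pos h, add_zero]
  by_cases ho : pvOc t = 0
  · rw [if_pos ho, if_pos ho, pow_succ]; ring
  · have h1 : t.length = t.length - 1 + 1 := by have := pvOc_le t; omega
    rw [if_neg ho, if_neg ho, Nat.add_sub_cancel]
    conv_lhs => rw [h1]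
    rw [pow_succ]; ring

lemma pvPureE_cons_odd (x : Int) (t : List Int) (E O : Int)
    (h : ¬ (PySem.Int.mod x 2 == 0) = true) :
    pvPureE (x :: t) E O = pvPureE t (E + O) (E + O) := by
  simp only [pvPureE, pvOc_cons, pvEc_cons, List.length_cons]
  rw [if_neg h, if_neg (by omega : ¬ pvOc t + 1 = 0), Nat.add_sub_cancel]
  by_cases ho : pvOc t = 0
  · have hec : pvEc t = t.length := by have := pvOc_add_pvEc t; omega
    rw [if_pos ho, hec]
  · have h1 : t.length = t.length - 1 + 1 := by have := pvOc_le t; omega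
    rw [if_neg ho]
    conv_lhs => rw [h1]
    rw [pow_succ]; ring

lemma pvDP (a : List Int) (E O : Int) :
    a.foldl solveStep (E % pvP, O % pvP) =
      (pvPureE a E O % pvP, pvPureE a O E % pvP) := by
  induction a generalizing E O with
  | nil => simp [pvPureE, pvOc, pvEc]
  | cons x t ih =>
    rw [List.foldl_cons]
    by_cases h : (PySem.Int.mod x 2 == 0) = true
    · rw [show solveStep (E % pvP, O % pvP) x = ((2 * E) % pvP, (2 * O) % pvP) from by
          unfold solveStep; rw [if_pos h]; simp only [pvModP_eq, pvMul2],
        ih (2 * E) (2 * O), pvPureE_cons_even x t E O h, pvPureE_cons_even x t O E h]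
    · rw [show solveStep (E % pvP, O % pvP) x = ((E + O) % pvP, (E + O) % pvP) from by
          unfold solveStep; rw [if_neg h]; simp only [pvModP_eq, pvAdd],
        ih (E + O) (E + O), pvPureE_cons_odd x t E O h, pvPureE_cons_odd x t O E h,
        Int.add_comm O E]

-- ===== VERDICT (by name: the statement is the Claim_ definition above) =====
theorem solve_spec : Claim_equal_solve := by
  intro a _
  show solve a = solve_alt a
  have hdp := pvDP a 1 0
  rw [show ((1 : Int) % pvP, (0 : Int) % pvP) = ((1 : Int), (0 : Int)) by decide] at hdp
  have hlen := pvOc_add_pvEc a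
  simp only [solve, solve_alt, pvCountA a 0 0, hdp, Nat.zero_add, pvModP_eq]
  simp only [pvPureE, mul_one, add_zero]
  by_cases ho : pvOc a = 0
  · rw [if_pos ho, if_pos ho, pvSub1]
  · rw [if_neg ho, if_neg ho, pvSub1, ← pow_add,
      show pvOc a - 1 + pvEc a = a.length - 1 by omega]
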